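-- pv_equiv track=rewrite | github.com/SusanFernandes/Creda | python/backend/app/routers/chat.py | _next_missing_field
-- ===== SOURCE A (Python) =====
-- _FIELD_PRIORITY_DEFAULT = [
--     "monthly_income",
--     "age",
--     "monthly_expenses",
--     "fire_target_age",
--     "rent_paid",
--     "city",
--     "parents_health_premium",
--     "parents_age_above_60",
--     "nps_contribution",
-- ]
--
-- def _next_missing_field(intent: str, missing: list[str]) -> str:
--     if not missing:
--         return ""
--     tax_first = ["rent_paid", "city", "parents_health_premium", "parents_age_above_60", "nps_contribution"]
--     if intent == "tax_wizard":
--         order = _FIELD_PRIORITY_DEFAULT[:3] + tax_first + [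
--             m for m in missing if m not in set(_FIELD_PRIORITY_DEFAULT + tax_first)
--         ]
--     elif intent == "fire_planner":
--         order = _FIELD_PRIORITY_DEFAULT[:3] + ["fire_target_age"] + [
--             m for m in missing if m not in _FIELD_PRIORITY_DEFAULT
--         ]
--     elif intent == "couples_finance":
--         order = _FIELD_PRIORITY_DEFAULT + ["partner_monthly_income"] + [
--             m for m in missing if m not in set(_FIELD_PRIORITY_DEFAULT + ["partner_monthly_income"])
--         ]
--     else:
--         order = _FIELD_PRIORITY_DEFAULT + [m for m in missing if m not in _FIELD_PRIORITY_DEFAULT]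
--     seen = set()
--     for f in order:
--         if f in missing and f not in seen:
--             return f
--     return missing[0]
-- ===== SOURCE B (Python) =====
-- _FIELD_PRIORITY_DEFAULT = [
--     "monthly_income",
--     "age",
--     "monthly_expenses",
--     "fire_target_age",
--     "rent_paid",
--     "city",
--     "parents_health_premium",
--     "parents_age_above_60",
--     "nps_contribution",
-- ]
--
--
-- def _pick(prefix: list[str], excluded: list[str], missing: list[str]) -> str:
--     # One pass over `missing`: minimal prefix-rank wins; otherwise the first
--     # field that is not excluded; otherwise fall back to missing[0].
--     rank = {f: i for i, f in enumerate(prefix)}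
--     excluded = set(excluded)
--     best_rank = None
--     first_free = None
--     for f in missing:
--         r = rank.get(f)
--         if r is not None and (best_rank is None or r < best_rank):
--             best_rank = r
--         if first_free is None and f not in excluded:
--             first_free = f
--     if best_rank is not None:
--         return prefix[best_rank]
--     if first_free is not None:
--         return first_free
--     return missing[0]
--
--
-- def _next_missing_field(intent: str, missing: list[str]) -> str:
--     if not missing:
--         return ""
--     base = _FIELD_PRIORITY_DEFAULT
--     tax_first = ["rent_paid", "city", "parents_health_premium", "parents_age_above_60", "nps_contribution"]
--     if intent == "tax_wizard":
--         return _pick(base[:3] + tax_first, base + tax_first, missing)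
--     elif intent == "fire_planner":
--         return _pick(base[:3] + ["fire_target_age"], base, missing)
--     elif intent == "couples_finance":
--         return _pick(base + ["partner_monthly_income"], base + ["partner_monthly_income"], missing)
--     else:
--         return _pick(base, base, missing)
-- ===== Notes on version B (the rewrite author's own statement) =====
-- stated objective: faster
-- what changed: Instead of concatenating a per-intent priority list with a filtered copy of `missing` and scanning that order list with repeated `f in missing` list-membership tests, B makes a single pass over `missing`, tracking the minimal priority rank (via a field->rank dict built from the same fixed prefix) and the first non-excluded field, then returns the best-ranked prefix field, else the first free field, else missing[0].
import Mathlib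
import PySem

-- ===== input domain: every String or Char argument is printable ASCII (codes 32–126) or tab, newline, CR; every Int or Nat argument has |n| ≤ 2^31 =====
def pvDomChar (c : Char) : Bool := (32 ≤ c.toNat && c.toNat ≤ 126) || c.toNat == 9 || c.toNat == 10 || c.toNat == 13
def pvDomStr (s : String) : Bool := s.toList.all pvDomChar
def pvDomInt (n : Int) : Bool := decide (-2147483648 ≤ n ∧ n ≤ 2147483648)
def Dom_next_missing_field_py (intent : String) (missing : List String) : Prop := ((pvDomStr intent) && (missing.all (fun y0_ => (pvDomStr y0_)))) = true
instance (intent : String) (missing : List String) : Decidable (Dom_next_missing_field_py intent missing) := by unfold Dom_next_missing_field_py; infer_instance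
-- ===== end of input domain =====

-- B replaces A's build-an-order-list-then-scan-it-against-`missing` with a single pass over
-- `missing` tracking the minimal priority rank (dict lookup) and the first non-excluded field.

-- ===== PORT A =====
def nmfDefault : List String :=
  ["monthly_income", "age", "monthly_expenses", "fire_target_age", "rent_paid",
   "city", "parents_health_premium", "parents_age_above_60", "nps_contribution"]

def nmfTaxFirst : List String :=
  ["rent_paid", "city", "parents_health_premium", "parents_age_above_60", "nps_contribution"]

-- A's final loop: `for f in order: if f in missing and f not in seen: return f` / `return missing[0]`
-- (`seen` is threaded but, as in the Python, nothing is ever added to it)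
def nmfScan (missing : List String) : List String → PySem.Set String → String
  | [], _ => (PySem.List.pyGet? missing 0).getD ""   -- missing[0]; only reached under the `missing ≠ []` guard
  | f :: rest, seen =>
      if missing.contains f && !(PySem.Set.contains seen f) then f else nmfScan missing rest seen

def next_missing_field_py (intent : String) (missing : List String) : String :=
  if missing = [] then ""
  else
    let order : List String :=
      if intent = "tax_wizard" then
        nmfDefault.take 3 ++ nmfTaxFirst ++
          missing.filter (fun m => !(PySem.Set.contains (PySem.Set.ofList (nmfDefault ++ nmfTaxFirst)) m))
      else if intent = "fire_planner" then
        nmfDefault.take 3 ++ ["fire_target_age"] ++ missing.filter (fun m => !(nmfDefault.contains m))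
      else if intent = "couples_finance" then
        nmfDefault ++ ["partner_monthly_income"] ++
          missing.filter (fun m => !(PySem.Set.contains (PySem.Set.ofList (nmfDefault ++ ["partner_monthly_income"])) m))
      else
        nmfDefault ++ missing.filter (fun m => !(nmfDefault.contains m))
    nmfScan missing order PySem.Set.empty

-- ===== PORT B =====
-- rank = {f: i for i, f in enumerate(prefix)}
def nmfRank (pfx : List String) : PySem.Dict String Int :=
  (PySem.List.enumerate pfx 0).foldl (fun d p => d.insert p.2 p.1) PySem.Dict.empty

-- B's single loop over `missing`, tracking (best_rank, first_free)
def nmfLoop (rank : PySem.Dict String Int) (excluded : PySem.Set String) (missing : List String) :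
    Option Int × Option String :=
  missing.foldl (fun st f =>
    (match rank.get? f with
     | some r =>
       match st.1 with
       | none => some r
       | some b => if r < b then some r else some b
     | none => st.1,
     if st.2.isNone && !(PySem.Set.contains excluded f) then some f else st.2)) (none, none)

-- B's helper `_pick(prefix, excluded, missing)`
def nmfPick (pfx excluded missing : List String) : String :=
  let st := nmfLoop (nmfRank pfx) (PySem.Set.ofList excluded) missing
  match st.1 with
  | some b => (PySem.List.pyGet? pfx b).getD ""   -- prefix[best_rank]; rank values index `prefix`
  | none =>
    match st.2 with
    | some f => f
    | none => (PySem.List.pyGet? missing 0).getD ""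

def next_missing_field_py_alt (intent : String) (missing : List String) : String :=
  if missing = [] then ""
  else if intent = "tax_wizard" then
    nmfPick (nmfDefault.take 3 ++ nmfTaxFirst) (nmfDefault ++ nmfTaxFirst) missing
  else if intent = "fire_planner" then
    nmfPick (nmfDefault.take 3 ++ ["fire_target_age"]) nmfDefault missing
  else if intent = "couples_finance" then
    nmfPick (nmfDefault ++ ["partner_monthly_income"]) (nmfDefault ++ ["partner_monthly_income"]) missing
  else
    nmfPick nmfDefault nmfDefault missing

-- ===== PRECONDITION & SPEC =====
def Spec_next_missing_field_py (intent : String) (missing : List String) (out : String) : Prop := out = next_missing_field_py_alt intent missing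
instance (intent : String) (missing : List String) (out : String) : Decidable (Spec_next_missing_field_py intent missing out) := by unfold Spec_next_missing_field_py; infer_instance

-- ===== CLAIM (what is proved, stated in full; the proofs are below) =====
def Claim_equal_next_missing_field_py : Prop := ∀ (intent : String) (missing : List String), Dom_next_missing_field_py intent missing → Spec_next_missing_field_py intent missing (next_missing_field_py intent missing)

-- ===== LEMMAS AND PROOFS =====

-- A's scan with an (always-empty) `seen` set is `find?` with fallback missing[0]
lemma nmfScan_eq_find (missing : List String) (L : List String) :
    nmfScan missing L PySem.Set.empty =
      match L.find? (fun f => missing.contains f) with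
      | some f => f
      | none => (PySem.List.pyGet? missing 0).getD "" := by
  induction L with
  | nil => rfl
  | cons f rest ih =>
    show (if missing.contains f && !(PySem.Set.contains PySem.Set.empty f) then f
          else nmfScan missing rest PySem.Set.empty) = _
    have hempty : PySem.Set.contains PySem.Set.empty f = false := rfl
    rw [hempty, List.find?_cons]
    cases h : missing.contains f with
    | true => simp
    | false => simpa [h] using ih

-- `find?` with a predicate true on every element is `head?`
lemma find?_of_forall {α : Type} (p : α → Bool) (l : List α) (h : ∀ x ∈ l, p x = true) :
    l.find? p = l.head? := by
  induction l with
  | nil => rfl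
  | cons x xs ih =>
    rw [List.find?_cons, h x (List.mem_cons_self), List.head?_cons]

-- the rank dict built from enumerate(prefix) looks up the first index in the prefix
lemma nmfRank_get? (P : List String) (hP : P.Nodup) (f : String) :
    (nmfRank P).get? f = (List.idxOf? f P).map (fun n : Nat => (n : Int)) := by
  have hitems : (nmfRank P).items =
      (PySem.List.enumerate P 0).map (fun p => (p.2, p.1)) := by
    have h := PySem.Dict.items_foldl_insert_fresh (l := PySem.List.enumerate P 0)
      (k := fun p => p.2) (v := fun p => p.1) (d := PySem.Dict.empty)
      (by intro a _; rfl)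
      (by rw [PySem.List.map_snd_enumerate]; exact hP)
    simpa [nmfRank] using h
  have hkeys : (nmfRank P).keys = P := by
    show (nmfRank P).items.map (·.1) = P
    rw [hitems, List.map_map]
    exact PySem.List.map_snd_enumerate P 0
  cases hidx : List.idxOf? f P with
  | none =>
    have hf : f ∉ P := List.idxOf?_eq_none_iff.mp hidx
    rw [Option.map_none]
    rw [PySem.Dict.get?_eq_none_iff_not_mem_keys, hkeys]
    exact hf
  | some k =>
    have hk' : PySem.List.index? P f = some k := by
      rw [PySem.List.index?_eq_idxOf?]; exact hidx
    obtain ⟨hk, hPk, _⟩ := PySem.List.getElem_of_index?_eq_some hk'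
    have hmem : (f, (k : Int)) ∈ (nmfRank P).items := by
      rw [hitems]
      exact List.mem_map.mpr ⟨((k : Int), f), by
        rw [PySem.List.mem_enumerate_iff]
        exact ⟨k, hk, by rw [hPk]; simp⟩, rfl⟩
    rw [PySem.Dict.get?_of_mem_items _ hmem (by rw [hkeys]; exact hP)]
    rfl

-- the first_free component of B's loop is find? of the non-excluded predicate
lemma nmfFree_eq_find (E : PySem.Set String) (l : List String) :
    l.foldl (fun o f => if o.isNone && !(PySem.Set.contains E f) then some f else o) none
      = l.find? (fun f => !(PySem.Set.contains E f)) := by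
  have hsome : ∀ (l' : List String) (a : String),
      l'.foldl (fun o f => if o.isNone && !(PySem.Set.contains E f) then some f else o) (some a)
        = some a := by
    intro l' a
    induction l' with
    | nil => rfl
    | cons x xs ih => simpa using ih
  induction l with
  | nil => rfl
  | cons x xs ih =>
    rw [List.foldl_cons, List.find?_cons]
    cases h : (!(PySem.Set.contains E x)) with
    | true => simpa [h] using hsome xs x
    | false => simpa [h] using ih

-- the best_rank component of B's loop is min? of the looked-up ranks
lemma nmfBest_eq_min? {q : String → Option Int} (l : List String) (b : Option Int) :
    l.foldl (fun o f =>
        match q f with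
        | some r => match o with
          | none => some r
          | some b => if r < b then some r else some b
        | none => o) b
      = match b with
        | none => (l.filterMap q).min?
        | some b0 => some ((l.filterMap q).foldl min b0) := by
  induction l generalizing b with
  | nil => cases b <;> rfl
  | cons f rest ih =>
    rw [List.foldl_cons, List.filterMap_cons]
    cases hq : q f with
    | none => simpa [hq] using ih b
    | some r =>
      have hmin : ∀ b0 : Int, (if r < b0 then some r else some b0) = some (min b0 r) := by
        intro b0
        rcases lt_or_ge r b0 with h | h
        · rw [if_pos h, min_eq_right h.le]
        · rw [if_neg (not_lt.mpr h), min_eq_left h]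
      cases b with
      | none =>
        show List.foldl (fun o f =>
            match q f with
            | some r => match o with
              | none => some r
              | some b => if r < b then some r else some b
            | none => o) (some r) rest = (r :: List.filterMap q rest).min?
        rw [ih (some r)]; simp [List.min?]
      | some b0 =>
        show List.foldl (fun o f =>
            match q f with
            | some r => match o with
              | none => some r
              | some b => if r < b then some r else some b
            | none => o) (if r < b0 then some r else some b0) rest
          = some (List.foldl min b0 (r :: List.filterMap q rest))
        rw [hmin b0, ih (some (min b0 r))]
        rfl

-- min? commutes with the Nat → Int coercion
lemma min?_map_natCast (l : List Nat) :
    (l.map (fun n : Nat => (n : Int))).min? = l.min?.map (fun n : Nat => (n : Int)) := by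
  have hfold : ∀ (l' : List Nat) (a : Nat),
      (l'.map (fun n : Nat => (n : Int))).foldl min ((a : Nat) : Int)
        = ((l'.foldl min a : Nat) : Int) := by
    intro l'
    induction l' with
    | nil => intro a; rfl
    | cons x xs ih =>
      intro a
      rw [List.map_cons, List.foldl_cons, List.foldl_cons, ← Nat.cast_min]
      exact ih _
  cases l with
  | nil => rfl
  | cons a l =>
    rw [List.map_cons]
    simp only [List.min?]
    rw [hfold l a]
    rfl

-- CRUX: the minimal first-index among `missing`'s fields appearing in P locates `find?` on P
lemma min?_idxOf?_spec (P missing : List String) :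
    match (missing.filterMap (fun f => List.idxOf? f P)).min? with
    | none => P.find? (fun f => missing.contains f) = none
    | some i => ∃ h : i < P.length, P.find? (fun f => missing.contains f) = some (P[i]) := by
  cases hmin : (missing.filterMap (fun f => List.idxOf? f P)).min? with
  | none =>
    have hnil := List.min?_eq_none_iff.mp hmin
    rw [List.find?_eq_none]
    intro x hxP hx
    have hxm : x ∈ missing := by simpa using hx
    have hxP' : x ∈ P := hxP
    have hsome : (PySem.List.index? P x).isSome := (PySem.List.index?_isSome_iff P x).mpr hxP'
    obtain ⟨k, hk⟩ := Option.isSome_iff_exists.mp hsome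
    have hkmem : k ∈ missing.filterMap (fun f => List.idxOf? f P) :=
      List.mem_filterMap.mpr ⟨x, hxm, by rw [← PySem.List.index?_eq_idxOf?]; exact hk⟩
    rw [hnil] at hkmem
    exact absurd hkmem (List.not_mem_nil)
  | some i =>
    obtain ⟨hmem, hlb⟩ := List.min?_eq_some_iff.mp hmin
    obtain ⟨f, hfmem, hidx⟩ := List.mem_filterMap.mp hmem
    have hidx' : PySem.List.index? P f = some i := by
      rw [PySem.List.index?_eq_idxOf?]; exact hidx
    obtain ⟨hk, hPk, _⟩ := PySem.List.getElem_of_index?_eq_some hidx'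
    refine ⟨hk, ?_⟩
    rw [List.find?_eq_some_iff_getElem]
    refine ⟨by simp [hPk, hfmem], i, hk, rfl, ?_⟩
    intro j hj
    simp only [Bool.not_eq_eq_eq_not, Bool.not_true]
    by_contra hcon
    have hjm : P[j] ∈ missing := by
      simpa using (Bool.not_eq_false _).mp hcon
    have hsome : (PySem.List.index? P (P[j])).isSome :=
      (PySem.List.index?_isSome_iff P _).mpr (List.getElem_mem _)
    obtain ⟨k, hk2⟩ := Option.isSome_iff_exists.mp hsome
    obtain ⟨hk2lt, _, hfirst2⟩ := PySem.List.getElem_of_index?_eq_some hk2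
    have hkj : k ≤ j := by
      by_contra hgt
      exact hfirst2 j (by omega) rfl
    have hkmem : k ∈ missing.filterMap (fun f => List.idxOf? f P) :=
      List.mem_filterMap.mpr ⟨P[j], hjm, by rw [← PySem.List.index?_eq_idxOf?]; exact hk2⟩
    have := hlb k hkmem
    omega

-- per-branch core equivalence: A's concat-and-scan equals B's _pick
lemma nmf_branch (P E missing : List String) (hP : P.Nodup) :
    nmfScan missing (P ++ missing.filter (fun m => !(PySem.Set.contains (PySem.Set.ofList E) m)))
        PySem.Set.empty
      = nmfPick P E missing := by
  rw [nmfScan_eq_find, List.find?_append]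
  -- the suffix scan: every filtered element is in missing, so find? there is head? of the filter
  have hsuffix :
      (missing.filter (fun m => !(PySem.Set.contains (PySem.Set.ofList E) m))).find?
          (fun f => missing.contains f)
        = missing.find? (fun m => !(PySem.Set.contains (PySem.Set.ofList E) m)) := by
    rw [find?_of_forall _ _ (by
      intro x hx
      simpa using List.mem_of_mem_filter hx), List.head?_filter]
  -- B's loop splits into its two independent accumulators
  have hloop : nmfLoop (nmfRank P) (PySem.Set.ofList E) missing =
      (missing.foldl (fun o f =>
          match (nmfRank P).get? f with
          | some r => match o with
            | none => some r
            | some b => if r < b then some r else some b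
          | none => o) none,
       missing.foldl (fun o f =>
          if o.isNone && !(PySem.Set.contains (PySem.Set.ofList E) f) then some f else o) none) := by
    exact PySem.List.foldl_prod_mk
      (fun o f =>
          match (nmfRank P).get? f with
          | some r => match o with
            | none => some r
            | some b => if r < b then some r else some b
          | none => o)
      (fun o f =>
          if o.isNone && !(PySem.Set.contains (PySem.Set.ofList E) f) then some f else o)
      missing none none
  -- the best_rank accumulator is the min? of the Nat indices, cast to Int
  have hbest : missing.foldl (fun o f =>
          match (nmfRank P).get? f with
          | some r => match o with
            | none => some r
            | some b => if r < b then some r else some b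
          | none => o) none
      = ((missing.filterMap (fun f => List.idxOf? f P)).min?).map (fun n : Nat => (n : Int)) := by
    rw [nmfBest_eq_min? missing none]
    have hq : (nmfRank P).get? = fun f => (List.idxOf? f P).map (fun n : Nat => (n : Int)) :=
      funext (nmfRank_get? P hP)
    rw [hq, ← List.map_filterMap, min?_map_natCast]
  unfold nmfPick
  rw [hloop, hbest, nmfFree_eq_find]
  have hcrux := min?_idxOf?_spec P missing
  cases hmin : (missing.filterMap (fun f => List.idxOf? f P)).min? with
  | some i =>
    rw [hmin] at hcrux
    obtain ⟨hi, hfind⟩ := hcrux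
    rw [hfind]
    simp only [Option.map_some]
    rw [PySem.List.pyGet?_natCast]
    rw [List.getElem?_eq_getElem hi]
    rfl
  | none =>
    rw [hmin] at hcrux
    rw [hcrux]
    simp only [Option.map_none, Option.none_or, hsuffix]

theorem next_missing_field_py_spec : Claim_equal_next_missing_field_py := by
  intro intent missing _
  unfold Spec_next_missing_field_py
  unfold next_missing_field_py next_missing_field_py_alt
  by_cases hm : missing = []
  · simp [hm]
  · simp only [if_neg hm]
    have hofl : PySem.Set.ofList nmfDefault = nmfDefault :=
      PySem.Set.ofList_eq_self_of_nodup nmfDefault (by decide)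
    have hdef : (fun m => !(nmfDefault.contains m))
        = fun m => !(PySem.Set.contains (PySem.Set.ofList nmfDefault) m) := by
      funext m
      rw [PySem.Set.contains_eq_listContains, hofl]
    by_cases h1 : intent = "tax_wizard"
    · simp only [if_pos h1]
      exact nmf_branch _ _ missing (by decide)
    · simp only [if_neg h1]
      by_cases h2 : intent = "fire_planner"
      · simp only [if_pos h2]
        rw [hdef]
        exact nmf_branch _ _ missing (by decide)
      · simp only [if_neg h2]
        by_cases h3 : intent = "couples_finance"
        · simp only [if_pos h3]
          exact nmf_branch _ _ missing (by decide)
        · simp only [if_neg h3]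
          rw [hdef]
          exact nmf_branch _ _ missing (by decide)
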